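-- pv_equiv track=rewrite | github.com/paraphina/paraphina | batch_runs/phase_a/mc_scale.py | compute_shard_ranges
-- ===== SOURCE A (Python) =====
-- from typing import Any, Dict, List, Optional
--
-- def compute_shard_ranges(runs: int, shards: int) -> List[Dict[str, int]]:
--     """
--     Compute contiguous shard ranges.
--
--     Returns list of dicts with 'start' and 'end' (exclusive) for each shard.
--     """
--     if shards <= 0:
--         raise ValueError("shards must be >= 1")
--     if runs <= 0:
--         raise ValueError("runs must be >= 1")
--     if shards > runs:
--         # More shards than runs - reduce shard count
--         shards = runs
--
--     base_count = runs // shards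
--     remainder = runs % shards
--
--     ranges = []
--     current_start = 0
--
--     for i in range(shards):
--         # First 'remainder' shards get an extra run
--         count = base_count + (1 if i < remainder else 0)
--         ranges.append({
--             "start": current_start,
--             "end": current_start + count,
--         })
--         current_start += count
--
--     return ranges
-- ===== SOURCE B (Python) =====
-- def compute_shard_ranges(runs: int, shards: int):
--     if shards <= 0:
--         raise ValueError("shards must be >= 1")
--     if runs <= 0:
--         raise ValueError("runs must be >= 1")
--     if shards > runs:
--         shards = runs
--     base, rem = divmod(runs, shards)
--
--     def boundary(i: int) -> int:
--         return i * base + min(i, rem)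
--
--     return [{"start": boundary(i), "end": boundary(i + 1)} for i in range(shards)]
-- ===== Notes on version B (the rewrite author's own statement) =====
-- stated objective: alternative
-- what changed: Replaces the running current_start accumulator loop with a closed-form boundary(i)=i*base+min(i,remainder) so each shard's range is computed independently from its index.
import Mathlib
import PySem

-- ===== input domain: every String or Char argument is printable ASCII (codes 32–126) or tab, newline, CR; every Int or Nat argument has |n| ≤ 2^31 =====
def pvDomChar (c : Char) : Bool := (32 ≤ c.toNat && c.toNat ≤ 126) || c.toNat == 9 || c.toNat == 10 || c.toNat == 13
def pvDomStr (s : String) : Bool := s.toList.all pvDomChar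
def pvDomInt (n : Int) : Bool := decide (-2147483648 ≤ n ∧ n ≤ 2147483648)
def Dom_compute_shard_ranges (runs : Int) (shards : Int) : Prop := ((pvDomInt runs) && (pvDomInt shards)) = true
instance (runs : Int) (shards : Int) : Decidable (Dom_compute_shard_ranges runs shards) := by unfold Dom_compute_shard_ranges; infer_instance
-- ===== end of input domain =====

-- B replaces A's running current_start accumulator with a closed-form boundary(i) = i*base + min(i, remainder); same cost, independent per-index ranges.


-- ===== PORT A =====
-- A raises ValueError when shards ≤ 0 or runs ≤ 0; those inputs are excluded by Pre_ and the port returns [] there.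
def compute_shard_ranges (runs : Int) (shards : Int) : List (List (String × Int)) :=
  if shards ≤ 0 then []
  else if runs ≤ 0 then []
  else
    let shards' := if shards > runs then runs else shards
    let base_count := PySem.Int.floordiv runs shards'
    let remainder := PySem.Int.mod runs shards'
    let res := (PySem.List.pyRange 0 shards' 1).foldl
      (fun (st : List (List (String × Int)) × Int) i =>
        let count := base_count + (if i < remainder then (1 : Int) else 0)
        (st.1 ++ [[("start", st.2), ("end", st.2 + count)]], st.2 + count))
      ([], 0)
    res.1

-- ===== PORT B =====
def csr_boundary (base rem i : Int) : Int := i * base + min i rem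

def compute_shard_ranges_alt (runs : Int) (shards : Int) : List (List (String × Int)) :=
  if shards ≤ 0 then []
  else if runs ≤ 0 then []
  else
    let s := if shards > runs then runs else shards
    let base := PySem.Int.floordiv runs s
    let rem := PySem.Int.mod runs s
    (PySem.List.pyRange 0 s 1).map (fun i =>
      [("start", csr_boundary base rem i), ("end", csr_boundary base rem (i + 1))])

-- ===== PRECONDITION & SPEC =====
-- Pre_ excludes exactly the inputs where A raises ValueError (shards ≤ 0 or runs ≤ 0).
def Pre_compute_shard_ranges (runs : Int) (shards : Int) : Prop := 1 ≤ runs ∧ 1 ≤ shards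
instance (runs : Int) (shards : Int) : Decidable (Pre_compute_shard_ranges runs shards) := by unfold Pre_compute_shard_ranges; infer_instance
def pvWitness_compute_shard_ranges : Int × Int := (7, 3)

def Spec_compute_shard_ranges (runs : Int) (shards : Int) (out : List (List (String × Int))) : Prop := out = compute_shard_ranges_alt runs shards
instance (runs : Int) (shards : Int) (out : List (List (String × Int))) : Decidable (Spec_compute_shard_ranges runs shards out) := by unfold Spec_compute_shard_ranges; infer_instance

-- ===== CLAIM (what is proved, stated in full; the proofs are below) =====
def Claim_equal_compute_shard_ranges : Prop := ∀ (runs : Int) (shards : Int), Dom_compute_shard_ranges runs shards → Pre_compute_shard_ranges runs shards → Spec_compute_shard_ranges runs shards (compute_shard_ranges runs shards)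

-- ===== LEMMAS AND PROOFS =====

-- one loop step advances the boundary: boundary(i+1) = boundary(i) + count(i)
lemma csr_boundary_step (base rem i : Int) :
    csr_boundary base rem (i + 1) = csr_boundary base rem i + (base + (if i < rem then (1 : Int) else 0)) := by
  unfold csr_boundary
  by_cases h : i < rem
  · have h1 : min i rem = i := min_eq_left (le_of_lt h)
    have h2 : min (i + 1) rem = i + 1 := min_eq_left (by omega)
    rw [h1, h2]; simp [h]; ring
  · have h1 : min i rem = rem := min_eq_right (by omega)
    have h2 : min (i + 1) rem = rem := min_eq_right (by omega)
    rw [h1, h2]; simp [h]; ring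

-- loop invariant: folding A's body from index a with current_start = boundary(a)
-- appends exactly B's per-index ranges and ends at boundary(b)
lemma csr_loop (base rem : Int) : ∀ (n : Nat) (a : Int) (acc : List (List (String × Int))),
    ((PySem.List.pyRange a (a + n) 1).foldl
      (fun (st : List (List (String × Int)) × Int) i =>
        let count := base + (if i < rem then (1 : Int) else 0)
        (st.1 ++ [[("start", st.2), ("end", st.2 + count)]], st.2 + count))
      (acc, csr_boundary base rem a)) =
    (acc ++ (PySem.List.pyRange a (a + n) 1).map (fun i =>
      [("start", csr_boundary base rem i), ("end", csr_boundary base rem (i + 1))]),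
     csr_boundary base rem (a + n)) := by
  intro n
  induction n with
  | zero => intro a acc; simp [PySem.List.pyRange_one_eq_nil (le_refl a)]
  | succ m ih =>
    intro a acc
    have hcons : PySem.List.pyRange a (a + (m + 1 : Nat)) 1 = a :: PySem.List.pyRange (a + 1) (a + (m + 1 : Nat)) 1 :=
      PySem.List.pyRange_one_cons (by push_cast; omega)
    have harg : a + ((m : Nat) + 1 : Nat) = (a + 1) + (m : Nat) := by push_cast; ring
    rw [hcons]
    simp only [List.foldl_cons]
    have hstep := csr_boundary_step base rem a
    rw [show csr_boundary base rem a + (base + (if a < rem then (1 : Int) else 0)) = csr_boundary base rem (a + 1) from hstep.symm]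
    rw [harg, ih (a + 1) (acc ++ [[("start", csr_boundary base rem a), ("end", csr_boundary base rem (a + 1))]])]
    simp

-- ===== VERDICT (by name: the statement is the Claim_ definition above) =====
theorem compute_shard_ranges_spec : Claim_equal_compute_shard_ranges := by
  intro runs shards _ hpre
  obtain ⟨hr, hs⟩ := hpre
  unfold Spec_compute_shard_ranges compute_shard_ranges compute_shard_ranges_alt
  have hs0 : ¬ shards ≤ 0 := by omega
  have hr0 : ¬ runs ≤ 0 := by omega
  simp only [hs0, hr0, if_false]
  set s := if shards > runs then runs else shards with hsdef
  have hspos : 0 < s := by rw [hsdef]; split <;> omega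
  set base := PySem.Int.floordiv runs s
  set rem := PySem.Int.mod runs s with hremdef
  have hrem : 0 ≤ rem := PySem.Int.mod_nonneg runs hspos
  have hb0 : csr_boundary base rem 0 = 0 := by
    unfold csr_boundary; simp [min_eq_left hrem]
  have h := csr_loop base rem s.toNat 0 []
  rw [show (0 : Int) + (s.toNat : Int) = s by omega] at h
  rw [hb0] at h
  rw [h]
  simp
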